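-- pv_equiv track=rewrite | github.com/amacarrilla/sf-emergency-kg- | scripts/falkor_load.py | _infer_type
-- ===== SOURCE A (Python) =====
-- def _infer_type(uri):
--     prefixes = {
--         'Incident_':           'Incident',
--         'Response_':           'Response',
--         'PoliceResponse_':     'PoliceResponse',
--         'CallType_':           'CallType',
--         'Concept_':            'IncidentConcept',
--         'Location_':           'Location',
--         'Neighborhood_':       'Neighborhood',
--         'PoliceDistrict_':     'PoliceDistrict',
--         'SupervisorDistrict_': 'SupervisorDistrict',
--         'TimeWindow_':         'TimeWindow',
--         'Unit_':               'Unit',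
--         'Agency_':             'Agency',
--         'StationArea_':        'StationArea',
--         'Battalion_':          'Battalion',
--     }
--     for prefix, ntype in prefixes.items():
--         if uri.startswith(prefix):
--             return ntype
--     return 'Node'
-- ===== SOURCE B (Python) =====
-- def _infer_type(uri):
--     head, sep, _tail = uri.partition('_')
--     if not sep:
--         return 'Node'
--     match head:
--         case 'Incident':           return 'Incident'
--         case 'Response':           return 'Response'
--         case 'PoliceResponse':     return 'PoliceResponse'
--         case 'CallType':           return 'CallType'
--         case 'Concept':            return 'IncidentConcept'
--         case 'Location':           return 'Location'
--         case 'Neighborhood':       return 'Neighborhood'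
--         case 'PoliceDistrict':     return 'PoliceDistrict'
--         case 'SupervisorDistrict': return 'SupervisorDistrict'
--         case 'TimeWindow':         return 'TimeWindow'
--         case 'Unit':               return 'Unit'
--         case 'Agency':             return 'Agency'
--         case 'StationArea':        return 'StationArea'
--         case 'Battalion':          return 'Battalion'
--         case _:                    return 'Node'
-- ===== Notes on version B (the rewrite author's own statement) =====
-- stated objective: idiomatic
-- what changed: Replaced the scan over a dict of 14 startswith tests by partitioning the URI at its first underscore and dispatching the head token with a match statement (no dict, no prefix loop).
import Mathlib
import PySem

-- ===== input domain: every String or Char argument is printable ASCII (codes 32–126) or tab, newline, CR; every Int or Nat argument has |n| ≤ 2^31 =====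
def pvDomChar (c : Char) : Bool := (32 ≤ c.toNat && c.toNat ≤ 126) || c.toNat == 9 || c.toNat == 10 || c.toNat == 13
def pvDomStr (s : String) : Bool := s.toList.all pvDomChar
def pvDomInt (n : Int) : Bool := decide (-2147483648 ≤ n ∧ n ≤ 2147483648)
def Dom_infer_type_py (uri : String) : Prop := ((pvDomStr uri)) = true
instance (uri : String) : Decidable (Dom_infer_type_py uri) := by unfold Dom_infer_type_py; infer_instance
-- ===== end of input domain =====

-- B replaces the scan over a dict of 14 startswith tests by partitioning the URI at its
-- first underscore and dispatching the head token with a match/case chain (idiomatic).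

-- ===== PORT A =====
-- A builds the prefix→type dict and scans it: 'for prefix, ntype in prefixes.items(): …'
def pvPrefixes : PySem.Dict String String := PySem.Dict.ofList [
  ("Incident_",           "Incident"),
  ("Response_",           "Response"),
  ("PoliceResponse_",     "PoliceResponse"),
  ("CallType_",           "CallType"),
  ("Concept_",            "IncidentConcept"),
  ("Location_",           "Location"),
  ("Neighborhood_",       "Neighborhood"),
  ("PoliceDistrict_",     "PoliceDistrict"),
  ("SupervisorDistrict_", "SupervisorDistrict"),
  ("TimeWindow_",         "TimeWindow"),
  ("Unit_",               "Unit"),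
  ("Agency_",             "Agency"),
  ("StationArea_",        "StationArea"),
  ("Battalion_",          "Battalion")]

def pvInferLoop (uri : String) : List (String × String) → String
  | [] => "Node"
  | (p, t) :: rest => if PySem.Str.startswith uri p then t else pvInferLoop uri rest

def infer_type_py (uri : String) : String := pvInferLoop uri pvPrefixes.items

-- ===== PORT B =====
-- hand port of str.partition (PySem has no partition): i = s.find(sep); absent → (s, '', ''),
-- else (s[:i], sep, s[i+len(sep):]) — exact CPython behaviour for nonempty sep.
def pvPartition (s sep : String) : String × String × String :=
  let i := PySem.Str.find s sep
  if i = -1 then (s, "", "")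
  else (PySem.Str.slice s none (some i), sep,
        PySem.Str.slice s (some (i + (PySem.Str.len sep : Int))) none)

-- Source B's 'match head: case …' — equality dispatch on string literals, in case order
def pvMatchHead (head : String) : String :=
  if head = "Incident" then "Incident"
  else if head = "Response" then "Response"
  else if head = "PoliceResponse" then "PoliceResponse"
  else if head = "CallType" then "CallType"
  else if head = "Concept" then "IncidentConcept"
  else if head = "Location" then "Location"
  else if head = "Neighborhood" then "Neighborhood"
  else if head = "PoliceDistrict" then "PoliceDistrict"
  else if head = "SupervisorDistrict" then "SupervisorDistrict"
  else if head = "TimeWindow" then "TimeWindow"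
  else if head = "Unit" then "Unit"
  else if head = "Agency" then "Agency"
  else if head = "StationArea" then "StationArea"
  else if head = "Battalion" then "Battalion"
  else "Node"

def infer_type_py_alt (uri : String) : String :=
  let r := pvPartition uri "_"
  if r.2.1 = "" then "Node" else pvMatchHead r.1

-- ===== PRECONDITION & SPEC =====
def Spec_infer_type_py (uri : String) (out : String) : Prop := out = infer_type_py_alt uri
instance (uri : String) (out : String) : Decidable (Spec_infer_type_py uri out) := by unfold Spec_infer_type_py; infer_instance

-- ===== CLAIM =====
def Claim_equal_infer_type_py : Prop := ∀ (uri : String), Dom_infer_type_py uri → Spec_infer_type_py uri (infer_type_py uri)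

-- ===== LEMMAS AND PROOFS =====

-- every key of A's dict is a token with no '_' followed by one trailing '_'
theorem pvKeys_shape : ∀ pt ∈ pvPrefixes.items, ∃ t, pt.1.toList = t ++ ['_'] ∧ '_' ∉ t := by
  have h : ∀ pt ∈ pvPrefixes.items,
      pt.1.toList.dropLast ++ ['_'] = pt.1.toList ∧ '_' ∉ pt.1.toList.dropLast := by decide
  intro pt hpt
  exact ⟨pt.1.toList.dropLast, ((h pt hpt).1).symm, (h pt hpt).2⟩

-- when '_' does not occur in the URI, A's loop over such keys returns "Node"
theorem pvLoop_node (uri : String) (h : '_' ∉ uri.toList) (L : List (String × String))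
    (hL : ∀ pt ∈ L, ∃ t, pt.1.toList = t ++ ['_'] ∧ '_' ∉ t) :
    pvInferLoop uri L = "Node" := by
  induction L with
  | nil => rfl
  | cons pt rest ih =>
    obtain ⟨p, t⟩ := pt
    obtain ⟨tok, hp, -⟩ := hL (p, t) (by simp)
    have hns : ¬ (PySem.Str.startswith uri p = true) := by
      rw [PySem.Str.startswith_eq, PySem.Chars.startswith_iff]
      intro hpre
      exact h (hpre.subset (by simp [hp]))
    simp only [pvInferLoop, hns]
    exact ih (fun q hq => hL q (by simp [hq]))

theorem pvFind_underscore (w r : List Char) (hw : '_' ∉ w) :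
    PySem.Chars.find (w ++ '_' :: r) ['_'] = (w.length : Int) := by
  set cs : List Char := w ++ '_' :: r with hcs
  have hinf : ['_'] <:+: cs := ⟨w, r, by rw [hcs]; simp⟩
  have hne : PySem.Chars.find cs ['_'] ≠ -1 := by
    rw [Ne, PySem.Chars.find_eq_neg_one_iff]
    exact fun h => h hinf
  have hspec := PySem.Chars.findFrom_natCast_spec cs ['_'] 0 (by simp)
    (by simpa [Nat.cast_zero, PySem.Chars.findFrom_zero] using hne)
  simp only [Nat.cast_zero, PySem.Chars.findFrom_zero] at hspec
  obtain ⟨h0le, hpre, hmin⟩ := hspec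
  set n : Nat := (PySem.Chars.find cs ['_']).toNat with hn
  have hfn : PySem.Chars.find cs ['_'] = (n : Int) := (Int.toNat_of_nonneg (by exact_mod_cast h0le)).symm
  have hat : cs[n]? = some '_' := by
    obtain ⟨tl, htl⟩ := hpre
    rw [← List.head?_drop, ← htl]
    rfl
  rcases lt_trichotomy n w.length with hlt | heq | hgt
  · exfalso
    rw [hcs, List.getElem?_append_left hlt] at hat
    exact hw (List.mem_of_getElem? hat)
  · rw [hfn, heq]
  · exfalso
    refine hmin w.length (Nat.zero_le _) hgt ?_
    rw [hcs, List.drop_left]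
    exact ⟨r, rfl⟩

-- A's scan equals B's match on the head token, given the first-token characterisation
theorem pvChain_match (uri : String) (w : List Char) (s : String)
    (hs : s.toList = w)
    (hpre : ∀ t : List Char, '_' ∉ t → ((t ++ ['_']) <+: uri.toList ↔ w = t)) :
    pvInferLoop uri pvPrefixes.items = pvMatchHead s := by
  have key : ∀ (t : String), '_' ∉ t.toList →
      PySem.Str.startswith uri (t ++ "_") = decide (s = t) := by
    intro t ht
    have hiff : PySem.Str.startswith uri (t ++ "_") = true ↔ s = t := by
      rw [PySem.Str.startswith_eq, PySem.Chars.startswith_iff]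
      have habp : (t ++ "_").toList = t.toList ++ ['_'] := by simp
      rw [habp, hpre t.toList ht, String.ext_iff]
      constructor
      · intro h; rw [hs]; exact h
      · intro h; rw [← hs]; exact h
    by_cases hc : s = t
    · rw [hiff.mpr hc]; simp [hc]
    · simp only [hc, decide_false]
      exact Bool.eq_false_iff.mpr (fun hx => hc (hiff.mp hx))
  have k1 : PySem.Str.startswith uri "Incident_" = decide (s = "Incident") := key "Incident" (by decide)
  have k2 : PySem.Str.startswith uri "Response_" = decide (s = "Response") := key "Response" (by decide)
  have k3 : PySem.Str.startswith uri "PoliceResponse_" = decide (s = "PoliceResponse") := key "PoliceResponse" (by decide)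
  have k4 : PySem.Str.startswith uri "CallType_" = decide (s = "CallType") := key "CallType" (by decide)
  have k5 : PySem.Str.startswith uri "Concept_" = decide (s = "Concept") := key "Concept" (by decide)
  have k6 : PySem.Str.startswith uri "Location_" = decide (s = "Location") := key "Location" (by decide)
  have k7 : PySem.Str.startswith uri "Neighborhood_" = decide (s = "Neighborhood") := key "Neighborhood" (by decide)
  have k8 : PySem.Str.startswith uri "PoliceDistrict_" = decide (s = "PoliceDistrict") := key "PoliceDistrict" (by decide)
  have k9 : PySem.Str.startswith uri "SupervisorDistrict_" = decide (s = "SupervisorDistrict") := key "SupervisorDistrict" (by decide)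
  have k10 : PySem.Str.startswith uri "TimeWindow_" = decide (s = "TimeWindow") := key "TimeWindow" (by decide)
  have k11 : PySem.Str.startswith uri "Unit_" = decide (s = "Unit") := key "Unit" (by decide)
  have k12 : PySem.Str.startswith uri "Agency_" = decide (s = "Agency") := key "Agency" (by decide)
  have k13 : PySem.Str.startswith uri "StationArea_" = decide (s = "StationArea") := key "StationArea" (by decide)
  have k14 : PySem.Str.startswith uri "Battalion_" = decide (s = "Battalion") := key "Battalion" (by decide)
  show pvInferLoop uri pvPrefixes.items = pvMatchHead s
  have hitems : pvPrefixes.items = [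
    ("Incident_", "Incident"), ("Response_", "Response"), ("PoliceResponse_", "PoliceResponse"),
    ("CallType_", "CallType"), ("Concept_", "IncidentConcept"), ("Location_", "Location"),
    ("Neighborhood_", "Neighborhood"), ("PoliceDistrict_", "PoliceDistrict"),
    ("SupervisorDistrict_", "SupervisorDistrict"), ("TimeWindow_", "TimeWindow"),
    ("Unit_", "Unit"), ("Agency_", "Agency"), ("StationArea_", "StationArea"),
    ("Battalion_", "Battalion")] := by decide
  rw [hitems]
  simp only [pvInferLoop, k1, k2, k3, k4, k5, k6, k7, k8, k9, k10, k11, k12, k13, k14,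
    decide_eq_true_eq, pvMatchHead]

-- ===== VERDICT =====
theorem infer_type_py_spec : Claim_equal_infer_type_py := by
  intro uri _
  show infer_type_py uri = infer_type_py_alt uri
  by_cases hm : '_' ∈ uri.toList
  · -- the URI contains an underscore: compare its first token against the keys/cases
    set w : List Char := uri.toList.takeWhile (· ≠ '_') with hwdef
    have hw : '_' ∉ w := by
      intro h
      have := List.mem_takeWhile_imp h
      simp at this
    have hsplit : ∃ r, uri.toList = w ++ '_' :: r := by
      have h2 : uri.toList.dropWhile (· ≠ '_') ≠ [] := by
        intro h0
        rw [List.dropWhile_eq_nil_iff] at h0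
        exact absurd (h0 _ hm) (by simp)
      refine ⟨(uri.toList.dropWhile (· ≠ '_')).tail, ?_⟩
      have hhd : (uri.toList.dropWhile (· ≠ '_')).head h2 = '_' := by
        have := List.head_dropWhile_not (p := (· ≠ '_')) (l := uri.toList) h2
        simpa using this
      have hcons := List.cons_head_tail h2
      rw [hhd] at hcons
      calc uri.toList = w ++ uri.toList.dropWhile (· ≠ '_') := by
            conv_lhs => rw [← List.takeWhile_append_dropWhile (p := (· ≠ '_')) (l := uri.toList)]
        _ = w ++ '_' :: (uri.toList.dropWhile (· ≠ '_')).tail := congrArg _ hcons.symm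
    obtain ⟨r, hcs⟩ := hsplit
    have hfind : PySem.Str.find uri "_" = (w.length : Int) := by
      rw [PySem.Str.find_eq]
      show PySem.Chars.find uri.toList ['_'] = (w.length : Int)
      rw [hcs]
      exact pvFind_underscore w r hw
    have hhead : (PySem.Str.slice uri none (some (w.length : Int))).toList = w := by
      rw [PySem.Str.toList_slice, PySem.Chars.slice_eq_listSlice, PySem.List.slice_to_natCast, hcs]
      simp
    have hpre : ∀ t : List Char, '_' ∉ t → ((t ++ ['_']) <+: uri.toList ↔ w = t) := by
      intro t ht
      constructor
      · rintro ⟨s, hs⟩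
        have huri : uri.toList = t ++ '_' :: s := by rw [← hs]; simp
        rw [hwdef, huri, List.takeWhile_append]
        have htw : List.takeWhile (· ≠ '_') t = t := by
          rw [List.takeWhile_eq_self_iff]
          intro x hx
          simp only [decide_eq_true_eq, ne_eq]
          rintro rfl
          exact ht hx
        rw [htw]
        simp
      · rintro rfl
        exact ⟨r, by rw [hcs]; simp⟩
    show pvInferLoop uri pvPrefixes.items = infer_type_py_alt uri
    have hr : pvPartition uri "_" =
        (PySem.Str.slice uri none (some (w.length : Int)), "_",
         PySem.Str.slice uri (some ((w.length : Int) + (PySem.Str.len "_" : Int))) none) := by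
      simp only [pvPartition, hfind]
      rw [if_neg (by omega)]
    simp only [infer_type_py_alt, hr]
    rw [if_neg (by decide)]
    exact pvChain_match uri w _ hhead hpre
  · -- no underscore: partition yields empty sep, no key can match; both give "Node"
    have hB : PySem.Str.find uri "_" = -1 := by
      rw [PySem.Str.find_eq]
      show PySem.Chars.find uri.toList ['_'] = -1
      rw [PySem.Chars.find_eq_neg_one_iff]
      exact fun hinf => hm (hinf.subset (by simp))
    show pvInferLoop uri pvPrefixes.items = infer_type_py_alt uri
    simp only [infer_type_py_alt, pvPartition, hB, reduceIte]
    exact pvLoop_node uri hm _ pvKeys_shape
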